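-- pv_equiv track=rewrite | github.com/pothireddy-gelivi/PythonProgramming | Functions/normal function/use.py | isDuck
-- ===== SOURCE A (Python) =====
-- def isDuck(n):
--     while n>0:
--         ld=n%10
--         n//=10
--         if ld==0:
--             return True
--
--     else:
--         return False
-- ===== SOURCE B (Python) =====
-- def isDuck(n):
--     return n > 0 and '0' in str(n)
-- ===== Notes on version B (the rewrite author's own statement) =====
-- stated objective: idiomatic
-- what changed: Replaces the arithmetic digit-extraction while-loop with a single guarded expression testing '0' in str(n); the guard n > 0 reproduces A's False for zero and negative inputs.
import Mathlib
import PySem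

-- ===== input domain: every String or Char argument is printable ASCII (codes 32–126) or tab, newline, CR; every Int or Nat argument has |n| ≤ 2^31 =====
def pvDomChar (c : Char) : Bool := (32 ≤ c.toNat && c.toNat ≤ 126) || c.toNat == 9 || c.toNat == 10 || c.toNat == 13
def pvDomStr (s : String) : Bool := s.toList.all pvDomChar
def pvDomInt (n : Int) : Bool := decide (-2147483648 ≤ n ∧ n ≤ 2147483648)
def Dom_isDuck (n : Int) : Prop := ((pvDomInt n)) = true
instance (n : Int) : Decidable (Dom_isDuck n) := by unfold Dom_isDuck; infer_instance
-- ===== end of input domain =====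

-- B replaces A's arithmetic digit-extraction loop by the idiomatic guarded test `n > 0 and '0' in str(n)`.


-- ===== PORT A =====
-- while n>0: ld = n%10; n //= 10; if ld == 0: return True; else-clause: return False
def isDuck (n : Int) : Bool :=
  if h : 0 < n then
    let ld := PySem.Int.mod n 10
    let n' := PySem.Int.floordiv n 10
    if ld == 0 then true else isDuck n'
  else false
  termination_by n.toNat
  decreasing_by
    simp only [PySem.Int.floordiv]
    rw [Int.fdiv_eq_ediv]
    simp only [if_pos (Or.inl (by norm_num : (0:Int) ≤ 10))]
    omega

-- ===== PORT B =====
-- return n > 0 and '0' in str(n)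
def isDuck_alt (n : Int) : Bool :=
  decide (0 < n) && PySem.Str.isIn "0" (PySem.Int.toStr n)

-- ===== PRECONDITION & SPEC =====
def Spec_isDuck (n : Int) (out : Bool) : Prop := out = isDuck_alt n
instance (n : Int) (out : Bool) : Decidable (Spec_isDuck n out) := by unfold Spec_isDuck; infer_instance

-- ===== CLAIM (what is proved, stated in full; the proofs are below) =====
def Claim_equal_isDuck : Prop := ∀ (n : Int), Dom_isDuck n → Spec_isDuck n (isDuck n)

-- ===== LEMMAS AND PROOFS =====

-- A's loop on a natural computes "some decimal digit is 0"
theorem isDuck_nat (m : Nat) : isDuck (m : Int) = decide (0 ∈ Nat.digits 10 m) := by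
  induction m using Nat.strong_induction_on with
  | _ m ih =>
    rw [isDuck]
    by_cases hm : 0 < m
    · rw [dif_pos (by exact_mod_cast hm)]
      have hmod : PySem.Int.mod (m : Int) 10 = ((m % 10 : Nat) : Int) := by
        simp only [PySem.Int.mod, Int.fmod_eq_emod]
        have : (0:Int) ≤ 10 ∨ (10:Int) ∣ (m:Int) := Or.inl (by norm_num)
        rw [if_pos this]
        omega
      have hdiv : PySem.Int.floordiv (m : Int) 10 = ((m / 10 : Nat) : Int) := by
        simp only [PySem.Int.floordiv, Int.fdiv_eq_ediv]
        have : (0:Int) ≤ 10 ∨ (10:Int) ∣ (m:Int) := Or.inl (by norm_num)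
        rw [if_pos this]
        omega
      rw [Nat.digits_def' (by norm_num : 1 < 10) hm]
      by_cases h0 : m % 10 = 0
      · have hb : (PySem.Int.mod (m : Int) 10 == 0) = true := by
          rw [hmod, h0]; rfl
        simp only [hb, if_true]
        simp [h0]
      · have hb : (PySem.Int.mod (m : Int) 10 == 0) = false := by
          rw [hmod]; simp; omega
        simp only [hb, Bool.false_eq_true, if_false, hdiv]
        rw [ih (m / 10) (Nat.div_lt_self hm (by norm_num))]
        rw [decide_eq_decide]
        simp only [List.mem_cons]
        constructor
        · intro h; exact Or.inr h
        · rintro (h | h)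
          · omega
          · exact h
    · have hm0 : m = 0 := by omega
      subst hm0
      rw [dif_neg (by norm_num)]
      simp

theorem toDigitsCore_eq_digits (f : Nat) : ∀ (m : Nat) (acc : List Char), 0 < m → m < f →
    Nat.toDigitsCore 10 f m acc = ((Nat.digits 10 m).map Nat.digitChar).reverse ++ acc := by
  induction f with
  | zero => intro m acc h1 h2; omega
  | succ f ih =>
    intro m acc h1 h2
    rw [show Nat.toDigitsCore 10 (f + 1) m acc
        = if m / 10 = 0 then (m % 10).digitChar :: acc
          else Nat.toDigitsCore 10 f (m / 10) ((m % 10).digitChar :: acc) from rfl]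
    rw [Nat.digits_def' (by norm_num : 1 < 10) h1]
    by_cases hd : m / 10 = 0
    · rw [if_pos hd, hd, Nat.digits_zero]
      simp
    · rw [if_neg hd, ih (m / 10) _ (Nat.pos_of_ne_zero hd)
        (by have := Nat.div_lt_self h1 (by norm_num : 1 < 10); omega)]
      simp

theorem zero_mem_iff_digitChar (m : Nat) :
    ('0' ∈ (Nat.digits 10 m).map Nat.digitChar) ↔ 0 ∈ Nat.digits 10 m := by
  constructor
  · intro h
    obtain ⟨d, hd, hc⟩ := List.mem_map.mp h
    have hlt : d < 10 := Nat.digits_lt_base (by norm_num) hd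
    have hzero : d = 0 := by
      interval_cases d <;> revert hc <;> decide
    rwa [hzero] at hd
  · intro h
    exact List.mem_map.mpr ⟨0, h, rfl⟩

theorem singleton_infix_iff {α : Type} (a : α) (l : List α) : [a] <:+: l ↔ a ∈ l := by
  constructor
  · intro h; exact h.subset (List.mem_singleton_self a)
  · intro h
    obtain ⟨s, t, rfl⟩ := List.append_of_mem h
    exact ⟨s, t, by simp⟩

-- ===== VERDICT (by name: the statement is the Claim_ definition above) =====
theorem isDuck_spec : Claim_equal_isDuck := by
  intro n _
  unfold Spec_isDuck isDuck_alt
  by_cases hn : 0 < n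
  · obtain ⟨m, rfl⟩ : ∃ m : Nat, n = (m : Int) := ⟨n.toNat, by omega⟩
    have hpos : 0 < m := by exact_mod_cast hn
    rw [isDuck_nat]
    have hchars : PySem.Int.toChars (m : Int) = Nat.toDigits 10 m := by
      rw [PySem.Int.toChars, if_neg (by omega : ¬ ((m : Int) < 0))]
      simp
    have hiff : PySem.Str.isIn "0" (PySem.Int.toStr (m : Int)) = true ↔
        0 ∈ Nat.digits 10 m := by
      rw [PySem.Str.isIn_iff_infix, PySem.Int.toList_toStr, hchars, Nat.toDigits,
        toDigitsCore_eq_digits (m + 1) m [] hpos (by omega), List.append_nil]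
      have h0 : "0".toList = ['0'] := rfl
      rw [h0, singleton_infix_iff, List.mem_reverse, zero_mem_iff_digitChar]
    by_cases hz : 0 ∈ Nat.digits 10 m
    · rw [hiff.mpr hz]
      simp only [Bool.and_true]
      rw [decide_eq_decide]
      exact ⟨fun _ => hn, fun _ => hz⟩
    · have hfalse : PySem.Str.isIn "0" (PySem.Int.toStr (m : Int)) = false :=
        Bool.eq_false_iff.mpr (fun hc => hz (hiff.mp hc))
      rw [hfalse]
      simp [hz]
  · rw [isDuck, dif_neg hn]
    simp [hn]
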